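-- pv_equiv track=rewrite | github.com/bmuralid/Pure-Fortran | xf2p.py | split_fortran_comment
-- ===== SOURCE A (Python) =====
-- def split_fortran_comment(line: str) -> tuple[str, str]:
--     in_str = False
--     quote = ""
--     out: list[str] = []
--     for ch in line:
--         if in_str:
--             out.append(ch)
--             if ch == quote:
--                 in_str = False
--         else:
--             if ch in ("'", '"'):
--                 in_str = True
--                 quote = ch
--                 out.append(ch)
--             elif ch == "!":
--                 code = "".join(out).rstrip()
--                 comment = line[len("".join(out)) + 1 :].strip()
--                 return code, comment
--             else:
--                 out.append(ch)
--     return "".join(out).rstrip(), ""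
-- ===== SOURCE B (Python) =====
-- def split_fortran_comment(line: str) -> tuple[str, str]:
--     n = len(line)
--     i = 0
--     while i < n:
--         ch = line[i]
--         if ch == "!":
--             return line[:i].rstrip(), line[i + 1 :].strip()
--         if ch == "'" or ch == '"':
--             j = line.find(ch, i + 1)
--             if j == -1:
--                 break
--             i = j + 1
--         else:
--             i += 1
--     return line.rstrip(), ""
-- ===== Notes on version B (the rewrite author's own statement) =====
-- stated objective: alternative
-- what changed: Replaced A's per-character state machine (in_str flag, quote variable, accumulator list joined at the end) by an index scan over the line that jumps over each quoted run with one str.find call and returns slices of the original line at the split point.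
import Mathlib
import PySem

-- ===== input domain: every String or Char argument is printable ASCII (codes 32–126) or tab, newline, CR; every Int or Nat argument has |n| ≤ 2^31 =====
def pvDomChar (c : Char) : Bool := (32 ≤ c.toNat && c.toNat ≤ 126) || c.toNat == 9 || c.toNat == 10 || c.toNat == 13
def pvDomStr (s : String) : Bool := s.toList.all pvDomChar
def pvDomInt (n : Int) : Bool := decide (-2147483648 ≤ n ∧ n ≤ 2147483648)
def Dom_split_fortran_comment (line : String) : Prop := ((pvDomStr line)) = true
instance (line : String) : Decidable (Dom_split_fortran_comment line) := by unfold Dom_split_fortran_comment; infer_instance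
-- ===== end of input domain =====

-- B replaces A's char-by-char state machine (in_str flag + accumulator list) by an
-- index scan that jumps over quoted runs with str.find and slices the line at the
-- split point (objective: alternative; return value only, no side effects).

-- ===== PORT A =====
-- A's state machine: rest of the line, in_str flag, current quote, accumulator `out`.
-- Python's `quote` starts as the (never-compared-before-assignment) empty string;
-- the port carries a Char that is likewise only read after being assigned.
def splitA_go (l : List Char) (rest : List Char) (in_str : Bool) (quote : Char)
    (out : List Char) : String × String :=
  match rest with
  | [] => (String.mk (PySem.Chars.rstrip out), "")
  | c :: cs =>
    if in_str then
      if c = quote then splitA_go l cs false quote (out ++ [c])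
      else splitA_go l cs true quote (out ++ [c])
    else if c = '\'' ∨ c = '"' then
      splitA_go l cs true c (out ++ [c])
    else if c = '!' then
      (String.mk (PySem.Chars.rstrip out),
       String.mk (PySem.Chars.strip (PySem.Chars.slice l (some ((out.length : Int) + 1)) none)))
    else splitA_go l cs false quote (out ++ [c])

def split_fortran_comment (line : String) : String × String :=
  splitA_go line.toList line.toList false ' ' []

-- ===== PORT B =====
-- needed by splitB_go's termination proof (cited in decreasing_by)
theorem pvFindFrom_lb (l sub : List Char) (i : Nat) (hi : i < l.length)
    (hj : PySem.Chars.findFrom l sub ((i : Int) + 1) ≠ -1) :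
    i < (PySem.Chars.findFrom l sub ((i : Int) + 1)).toNat := by
  have hc : ((i : Int) + 1) = ((i + 1 : Nat) : Int) := by push_cast; ring
  rw [hc] at hj ⊢
  have hs := PySem.Chars.findFrom_natCast_spec l sub (i + 1) (by omega) hj
  have h1 := hs.1
  omega

def splitB_go (l : List Char) (i : Nat) : String × String :=
  if h : i < l.length then
    if l[i] = '!' then
      (String.mk (PySem.Chars.rstrip (PySem.Chars.slice l none (some (i : Int)))),
       String.mk (PySem.Chars.strip (PySem.Chars.slice l (some ((i : Int) + 1)) none)))
    else if l[i] = '\'' ∨ l[i] = '"' then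
      if hj : PySem.Chars.findFrom l [l[i]] ((i : Int) + 1) = -1 then
        (String.mk (PySem.Chars.rstrip l), "")
      else splitB_go l ((PySem.Chars.findFrom l [l[i]] ((i : Int) + 1)).toNat + 1)
    else splitB_go l (i + 1)
  else (String.mk (PySem.Chars.rstrip l), "")
termination_by l.length - i
decreasing_by
  · have := pvFindFrom_lb l [l[i]] i h hj
    omega
  · omega

def split_fortran_comment_alt (line : String) : String × String :=
  splitB_go line.toList 0

-- ===== PRECONDITION & SPEC =====
def Spec_split_fortran_comment (line : String) (out : String × String) : Prop := out = split_fortran_comment_alt line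
instance (line : String) (out : String × String) : Decidable (Spec_split_fortran_comment line out) := by unfold Spec_split_fortran_comment; infer_instance

-- ===== CLAIM (what is proved, stated in full; the proofs are below) =====
def Claim_equal_split_fortran_comment : Prop := ∀ (line : String), Dom_split_fortran_comment line → Spec_split_fortran_comment line (split_fortran_comment line)

-- ===== LEMMAS AND PROOFS =====

theorem pvPrefix_q (l : List Char) (q : Char) (k : Nat) (hk : k < l.length) :
    [q] <+: l.drop k ↔ l[k] = q := by
  rw [List.drop_eq_getElem_cons hk, List.cons_prefix_cons]
  simp [eq_comm]

theorem pvFF_end (l : List Char) (q : Char) :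
    PySem.Chars.findFrom l [q] ((l.length : Nat) : Int) = -1 := by
  rw [PySem.Chars.findFrom_natCast_eq_neg_one_iff l [q] l.length le_rfl]
  simp

theorem pvFF_here (l : List Char) (q : Char) (k : Nat) (hk : k < l.length) (hq : l[k] = q) :
    PySem.Chars.findFrom l [q] (k : Int) = (k : Int) := by
  have hne : PySem.Chars.findFrom l [q] (k : Int) ≠ -1 := by
    intro h
    rw [PySem.Chars.findFrom_natCast_eq_neg_one_iff l [q] k hk.le] at h
    exact h ((pvPrefix_q l q k hk).2 hq).isInfix
  obtain ⟨h1, h2, h3⟩ := PySem.Chars.findFrom_natCast_spec l [q] k hk.le hne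
  have htn : (PySem.Chars.findFrom l [q] (k : Int)).toNat = k := by
    by_contra hne2
    exact h3 k le_rfl (by omega) ((pvPrefix_q l q k hk).2 hq)
  omega

theorem pvFF_step (l : List Char) (q : Char) (k : Nat) (hk : k < l.length) (hq : l[k] ≠ q) :
    PySem.Chars.findFrom l [q] (k : Int) = PySem.Chars.findFrom l [q] ((k : Int) + 1) := by
  have hc : ((k : Int) + 1) = ((k + 1 : Nat) : Int) := by push_cast; ring
  rw [hc]
  by_cases h2 : PySem.Chars.findFrom l [q] ((k + 1 : Nat) : Int) = -1
  · rw [h2, PySem.Chars.findFrom_natCast_eq_neg_one_iff l [q] k hk.le]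
    rw [PySem.Chars.findFrom_natCast_eq_neg_one_iff l [q] (k + 1) (by omega)] at h2
    intro hin
    rw [List.drop_eq_getElem_cons hk, List.infix_cons_iff] at hin
    rcases hin with hp | hin
    · exact hq ((List.cons_prefix_cons.1 hp).1.symm)
    · exact h2 hin
  · obtain ⟨h1, hpre, hmin⟩ := PySem.Chars.findFrom_natCast_spec l [q] (k + 1) (by omega) h2
    have hfn : k + 1 ≤ (PySem.Chars.findFrom l [q] ((k + 1 : Nat) : Int)).toNat := by omega
    have hdk : l.drop (PySem.Chars.findFrom l [q] ((k + 1 : Nat) : Int)).toNat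
        = (l.drop k).drop ((PySem.Chars.findFrom l [q] ((k + 1 : Nat) : Int)).toNat - k) := by
      rw [List.drop_drop]
      congr 1
      omega
    have hne : PySem.Chars.findFrom l [q] (k : Int) ≠ -1 := by
      intro hcontra
      rw [PySem.Chars.findFrom_natCast_eq_neg_one_iff l [q] k hk.le] at hcontra
      apply hcontra
      rw [hdk] at hpre
      exact hpre.isInfix.trans (List.drop_suffix _ _).isInfix
    obtain ⟨g1, gpre, gmin⟩ := PySem.Chars.findFrom_natCast_spec l [q] k hk.le hne
    have hfk : (PySem.Chars.findFrom l [q] (k : Int)).toNat ≠ k := by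
      intro he
      rw [he] at gpre
      exact hq ((pvPrefix_q l q k hk).1 gpre)
    have heq : (PySem.Chars.findFrom l [q] (k : Int)).toNat
        = (PySem.Chars.findFrom l [q] ((k + 1 : Nat) : Int)).toNat := by
      by_contra hne2
      rcases Nat.lt_or_ge (PySem.Chars.findFrom l [q] (k : Int)).toNat
          (PySem.Chars.findFrom l [q] ((k + 1 : Nat) : Int)).toNat with hlt | hge
      · exact hmin _ (by omega) hlt gpre
      · exact gmin _ (by omega) (by omega) hpre
    omega

theorem pvTake_succ_eq (l : List Char) (i : Nat) (hi : i < l.length) :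
    l.take i ++ [l[i]] = l.take (i + 1) := by
  rw [List.take_succ]
  simp [List.getElem?_eq_getElem hi]

-- A's state machine in string mode equals: jump to the next closing quote (or fall off the end).
theorem pvSkipA (l : List Char) (q : Char) :
    ∀ k i, l.length - i = k → i ≤ l.length →
      splitA_go l (l.drop i) true q (l.take i) =
        if PySem.Chars.findFrom l [q] (i : Int) = -1
        then (String.mk (PySem.Chars.rstrip l), "")
        else splitA_go l (l.drop ((PySem.Chars.findFrom l [q] (i : Int)).toNat + 1)) false q
               (l.take ((PySem.Chars.findFrom l [q] (i : Int)).toNat + 1)) := by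
  intro k
  induction k with
  | zero =>
    intro i hk hi
    have hieq : i = l.length := by omega
    subst hieq
    rw [if_pos (pvFF_end l q)]
    simp [splitA_go]
  | succ k IH =>
    intro i hk hi
    have hi' : i < l.length := by omega
    rw [List.drop_eq_getElem_cons hi']
    by_cases hq : l[i] = q
    · simp only [splitA_go, if_pos hq, pvTake_succ_eq l i hi']
      rw [pvFF_here l q i hi' hq]
      have : ¬ ((i : Int) = -1) := by omega
      rw [if_neg this]
      simp
    · simp only [splitA_go, if_neg hq, pvTake_succ_eq l i hi']
      rw [pvFF_step l q i hi' hq]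
      have hc : ((i : Int) + 1) = ((i + 1 : Nat) : Int) := by push_cast; ring
      rw [hc]
      exact IH (i + 1) (by omega) (by omega)
  -- note: `if_pos rfl` discharges the `in_str = true` test after simp only reduces the match

-- main invariant: outside a string, A with out = l.take i equals B at index i
theorem pvMain (l : List Char) :
    ∀ k, ∀ i, l.length - i = k → i ≤ l.length → ∀ q,
      splitA_go l (l.drop i) false q (l.take i) = splitB_go l i := by
  intro k
  induction k using Nat.strong_induction_on with
  | _ k IH =>
    intro i hk hi q
    by_cases hlt : i < l.length
    · rw [List.drop_eq_getElem_cons hlt, splitB_go]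
      rw [dif_pos hlt]
      by_cases hbang : l[i] = '!'
      · have hnq : ¬ (l[i] = '\'' ∨ l[i] = '"') := by
          rw [hbang]; simp
        simp only [splitA_go, if_neg (by simp : ¬ (false = true)), if_neg hnq, if_pos hbang,
          PySem.Chars.slice_eq_listSlice, PySem.List.slice_to_natCast]
        have hlen : (l.take i).length = i := by simp [hlt.le]
        rw [hlen]
      · by_cases hqc : l[i] = '\'' ∨ l[i] = '"'
        · simp only [splitA_go, if_neg (by simp : ¬ (false = true)), if_pos hqc,
            pvTake_succ_eq l i hlt]
          rw [if_neg hbang]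
          have hc : ((i : Int) + 1) = ((i + 1 : Nat) : Int) := by push_cast; ring
          rw [pvSkipA l l[i] (l.length - (i + 1)) (i + 1) rfl (by omega)]
          rw [← hc]
          by_cases hj : PySem.Chars.findFrom l [l[i]] ((i : Int) + 1) = -1
          · rw [if_pos hj, dif_pos hj]
          · rw [if_neg hj, dif_neg hj]
            -- A continues at m+1 where m is the closing-quote index; B recurses there too
            have hm := pvFindFrom_lb l [l[i]] i hlt hj
            have hj' : PySem.Chars.findFrom l [l[i]] ((i + 1 : Nat) : Int) ≠ -1 := by
              rw [← hc]; exact hj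
            obtain ⟨h1, hpre, hmin⟩ :=
              PySem.Chars.findFrom_natCast_spec l [l[i]] (i + 1) (by omega) hj'
            have hlenpre := hpre.length_le
            simp only [List.length_drop, List.length_cons] at hlenpre
            rw [← hc] at hlenpre h1
            have hmlt : (PySem.Chars.findFrom l [l[i]] ((i : Int) + 1)).toNat < l.length := by
              simp at hlenpre
              omega
            exact IH (l.length - ((PySem.Chars.findFrom l [l[i]] ((i : Int) + 1)).toNat + 1))
              (by omega) _ rfl (by omega) l[i]
        · simp only [splitA_go, if_neg (by simp : ¬ (false = true)), if_neg hqc,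
            if_neg hbang, pvTake_succ_eq l i hlt]
          exact IH (l.length - (i + 1)) (by omega) (i + 1) rfl (by omega) q
    · have hieq : i = l.length := by omega
      subst hieq
      rw [splitB_go, dif_neg hlt]
      simp [splitA_go]

-- ===== VERDICT (by name: the statement is the Claim_ definition above) =====
theorem split_fortran_comment_spec : Claim_equal_split_fortran_comment := by
  unfold Claim_equal_split_fortran_comment Spec_split_fortran_comment
  intro line _
  unfold split_fortran_comment split_fortran_comment_alt
  have h := pvMain line.toList (line.toList.length - 0) 0 rfl (by omega) ' '
  simpa using h
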